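-- pv_equiv track=rewrite | github.com/aswinachu/Information-Retrieval | Searcher using Cosine similarity/searcher.py | count_doc_frequencies
-- ===== SOURCE A (Python) =====
-- def count_doc_frequencies(docs):
--     """ Returning a dict mapping terms to document frequency.
--     >>> res = Index().count_doc_frequencies([['a', 'b', 'a'], ['a', 'b', 'c'], ['a']])
--     >>> res['a']
--     3
--     >>> res['b']
--     2
--     >>> res['c']
--     1
--     """
--     dict = {}
--     list_result = []
--     for doc in docs:
--         for word in doc:
--             if word not in dict:
--                 dict[word] = 1
--                 list_result.append(word)
--             elif word not in list_result:
--                 dict[word]+=1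
--                 list_result.append(word)
--         list_result =[]
--     return dict
--     pass
-- ===== SOURCE B (Python) =====
-- def count_doc_frequencies(docs):
--     # Inverted index: term -> set of document indices; document frequency = set size.
--     occ = {}
--     for i, doc in enumerate(docs):
--         for word in doc:
--             occ.setdefault(word, set()).add(i)
--     return {word: len(ids) for word, ids in occ.items()}
-- ===== Notes on version B (the rewrite author's own statement) =====
-- stated objective: faster
-- what changed: Replaces A's inline counter plus per-document seen-list (a linear membership scan of that list for every word) with a two-pass inverted index: one pass builds a dict mapping each term to the set of document indices containing it, then a second pass maps each set to its size.
import Mathlib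
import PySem

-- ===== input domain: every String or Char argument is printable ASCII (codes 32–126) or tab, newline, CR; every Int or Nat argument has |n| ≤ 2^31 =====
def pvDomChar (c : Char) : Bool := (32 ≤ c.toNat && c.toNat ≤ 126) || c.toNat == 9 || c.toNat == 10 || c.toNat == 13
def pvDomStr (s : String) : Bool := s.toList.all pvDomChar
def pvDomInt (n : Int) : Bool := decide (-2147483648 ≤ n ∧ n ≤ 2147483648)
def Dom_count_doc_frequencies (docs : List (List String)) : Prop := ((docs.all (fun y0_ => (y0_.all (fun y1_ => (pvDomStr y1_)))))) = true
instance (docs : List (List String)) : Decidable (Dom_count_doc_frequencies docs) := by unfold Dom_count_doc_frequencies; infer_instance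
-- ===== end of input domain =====

-- B replaces A's inline counter + per-document seen-list with a two-pass inverted index
-- (term -> set of document indices, then a pass mapping each set to its size); measured faster (no per-word list scan).


-- ===== PORT A =====
-- one word of one document; state = (the counter dict, the per-document list_result)
def aStep (st : PySem.Dict String Int × List String) (word : String) :
    PySem.Dict String Int × List String :=
  if ¬ st.1.contains word = true then (st.1.insert word 1, st.2 ++ [word])
  else if word ∉ st.2 then (st.1.modify word 0 (· + 1), st.2 ++ [word])
  else st

-- one document: list_result starts empty and is discarded afterwards (list_result = [])
def aDoc (d : PySem.Dict String Int) (doc : List String) : PySem.Dict String Int :=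
  (doc.foldl aStep (d, [])).1

def count_doc_frequencies (docs : List (List String)) : List (String × Int) :=
  (docs.foldl aDoc PySem.Dict.empty).items

-- ===== PORT B =====
-- occ.setdefault(word, set()).add(i)
def bAdd (i : Int) (occ : PySem.Dict String (PySem.Set Int)) (word : String) :
    PySem.Dict String (PySem.Set Int) :=
  occ.modify word PySem.Set.empty (fun s => s.add i)

def bDoc (occ : PySem.Dict String (PySem.Set Int)) (p : Int × List String) :
    PySem.Dict String (PySem.Set Int) :=
  p.2.foldl (bAdd p.1) occ

def count_doc_frequencies_alt (docs : List (List String)) : List (String × Int) :=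
  (((PySem.List.enumerate docs).foldl bDoc PySem.Dict.empty).items).map
    (fun p => (p.1, PySem.Set.len p.2))

-- ===== PRECONDITION & SPEC =====
def Spec_count_doc_frequencies (docs : List (List String)) (out : List (String × Int)) : Prop := out = count_doc_frequencies_alt docs
instance (docs : List (List String)) (out : List (String × Int)) : Decidable (Spec_count_doc_frequencies docs out) := by unfold Spec_count_doc_frequencies; infer_instance

-- ===== CLAIM (what is proved, stated in full; the proofs are below) =====
def Claim_equal_count_doc_frequencies : Prop := ∀ (docs : List (List String)), Dom_count_doc_frequencies docs → Spec_count_doc_frequencies docs (count_doc_frequencies docs)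

-- ===== LEMMAS AND PROOFS =====

-- B's set-dict viewed through A's eyes: replace every set by its size
def fval (p : String × PySem.Set Int) : String × Int := (p.1, (p.2.length : Int))

theorem contains_map_fval (l : List (String × PySem.Set Int)) (w : String) :
    (PySem.Dict.mk (l.map fval)).contains w = (PySem.Dict.mk l).contains w := by
  simp [PySem.Dict.contains, List.any_map, fval, Function.comp_def]

theorem get?_map_fval (l : List (String × PySem.Set Int)) (w : String) :
    (PySem.Dict.mk (l.map fval)).get? w
      = ((PySem.Dict.mk l).get? w).map (fun s => (s.length : Int)) := by
  simp only [PySem.Dict.get?, List.find?_map, Option.map_map]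
  have hcomp : ((fun (p : String × Int) => p.1 == w) ∘ fval)
      = (fun (p : String × PySem.Set Int) => p.1 == w) := by
    funext q; simp [fval]
  rw [hcomp]
  cases (PySem.Dict.mk l).items.find? (fun p => p.1 == w) <;> rfl

theorem get?_eq_none_of_contains_false {ν : Type} (d : PySem.Dict String ν) (w : String)
    (h : d.contains w = false) : d.get? w = none := by
  simp only [PySem.Dict.contains, List.any_eq_false] at h
  simp only [PySem.Dict.get?, Option.map_eq_none_iff, List.find?_eq_none]
  exact h

theorem find?_of_contains_true {ν : Type} (d : PySem.Dict String ν) (w : String)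
    (h : d.contains w = true) :
    ∃ pr, d.items.find? (fun p => p.1 == w) = some pr ∧ pr.1 = w ∧ d.get? w = some pr.2 := by
  simp only [PySem.Dict.contains, List.any_eq_true] at h
  have hs : (d.items.find? (fun p => p.1 == w)).isSome := List.find?_isSome.mpr h
  obtain ⟨pr, hpr⟩ := Option.isSome_iff_exists.mp hs
  refine ⟨pr, hpr, ?_, by simp [PySem.Dict.get?, hpr]⟩
  have := List.find?_some hpr
  simpa using this

theorem get?_some_mem {ν : Type} (d : PySem.Dict String ν) (w : String) (v : ν)
    (h : d.get? w = some v) : (w, v) ∈ d.items := by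
  simp only [PySem.Dict.get?, Option.map_eq_some_iff] at h
  obtain ⟨pr, hpr, hv⟩ := h
  have hk := List.find?_some hpr
  have hmem := List.mem_of_find?_eq_some hpr
  have : pr = (w, v) := by
    obtain ⟨a, b⟩ := pr
    simp_all
  exact this ▸ hmem

theorem not_mem_keys_of_contains_false {ν : Type} (d : PySem.Dict String ν) (w : String)
    (h : d.contains w = false) : w ∉ d.items.map Prod.fst := by
  simp only [PySem.Dict.contains, List.any_eq_false] at h
  intro hmem
  obtain ⟨p, hp, he⟩ := List.mem_map.mp hmem
  exact h p hp (by simp [he])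

theorem insert_items_of_not_contains {ν : Type} (d : PySem.Dict String ν) (w : String) (v : ν)
    (h : d.contains w = false) : (d.insert w v).items = d.items ++ [(w, v)] := by
  simp [PySem.Dict.insert, h]

theorem insert_items_of_contains {ν : Type} (d : PySem.Dict String ν) (w : String) (v : ν)
    (h : d.contains w = true) :
    (d.insert w v).items = d.items.map (fun p => if p.1 == w then (w, v) else p) := by
  simp [PySem.Dict.insert, h]

theorem mem_insert_items {ν : Type} (d : PySem.Dict String ν) (w : String) (v : ν)
    (p : String × ν) (hp : p ∈ (d.insert w v).items) : p.2 = v ∨ p ∈ d.items := by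
  by_cases h : d.contains w = true
  · rw [insert_items_of_contains d w v h] at hp
    obtain ⟨q, hq, he⟩ := List.mem_map.mp hp
    by_cases hk : q.1 == w
    · simp only [hk, if_true] at he; left; simp [← he]
    · simp only [hk, if_false, Bool.false_eq_true] at he; right; exact he ▸ hq
  · rw [insert_items_of_not_contains d w v (by simpa using h)] at hp
    rcases List.mem_append.mp hp with h1 | h1
    · right; exact h1
    · left; simp only [List.mem_singleton] at h1; simp [h1]

theorem keys_insert_of_contains {ν : Type} (d : PySem.Dict String ν) (w : String) (v : ν)
    (h : d.contains w = true) :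
    (d.insert w v).items.map Prod.fst = d.items.map Prod.fst := by
  rw [insert_items_of_contains d w v h, List.map_map]
  apply List.map_congr_left
  intro p _
  by_cases hk : p.1 == w
  · simp only [Function.comp_apply, hk, if_true]
    exact (beq_iff_eq.mp hk).symm
  · simp only [Function.comp_apply, beq_iff_eq] at hk ⊢
    simp [hk]

-- on a duplicate-free dict, find? = some pr means replacing the pr-keyed entry is the identity
theorem map_replace_eq_self {ν : Type} :
    ∀ (l : List (String × ν)) (w : String) (pr : String × ν),
    (l.map Prod.fst).Nodup → l.find? (fun q => q.1 == w) = some pr →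
    l.map (fun p => if p.1 == w then (w, pr.2) else p) = l := by
  intro l
  induction l with
  | nil => intro w pr _ hf; simp at hf
  | cons a t ih =>
    intro w pr hnd hf
    simp only [List.map_cons, List.nodup_cons] at hnd
    by_cases ha : a.1 == w
    · rw [List.find?_cons_of_pos (by simpa using ha)] at hf
      have hpr : pr = a := by simpa using hf.symm
      have haw : a.1 = w := beq_iff_eq.mp ha
      have hhead : (if a.1 == w then (w, pr.2) else a) = a := by
        simp [hpr, ← haw]
      have htail : t.map (fun p => if p.1 == w then (w, pr.2) else p) = t := by
        conv_rhs => rw [← List.map_id t]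
        apply List.map_congr_left
        intro p hp
        have hne : p.1 ≠ w := by
          intro he
          apply hnd.1
          rw [haw, ← he]
          exact List.mem_map.mpr ⟨p, hp, rfl⟩
        simp [hne]
      simp only [List.map_cons, hhead, htail]
    · rw [List.find?_cons_of_neg (by simpa using ha)] at hf
      have hhead : (if a.1 == w then (w, pr.2) else a) = a := by simp [ha]
      simp only [List.map_cons, hhead, ih w pr hnd.2 hf]

theorem insert_getD_self {ν : Type} (d : PySem.Dict String ν) (w : String) (dflt : ν)
    (hnd : (d.items.map Prod.fst).Nodup) (h : d.contains w = true) :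
    d.insert w (d.getD w dflt) = d := by
  obtain ⟨pr, hf, _, hv⟩ := find?_of_contains_true d w h
  have hgd : d.getD w dflt = pr.2 := by simp [PySem.Dict.getD, hv]
  have hit : (d.insert w (d.getD w dflt)).items = d.items := by
    rw [hgd, insert_items_of_contains d w pr.2 h]
    exact map_replace_eq_self d.items w pr hnd hf
  cases d with
  | mk l => exact congrArg PySem.Dict.mk hit

-- pushing fval through an overwrite of an existing key
theorem insert_map_fval (occ : PySem.Dict String (PySem.Set Int)) (w : String)
    (v : PySem.Set Int) (h : occ.contains w = true) :
    PySem.Dict.mk (((occ.insert w v).items).map fval)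
      = (PySem.Dict.mk (occ.items.map fval)).insert w ((v.length : Int)) := by
  have h' : (PySem.Dict.mk (occ.items.map fval)).contains w = true := by
    rw [contains_map_fval]; exact h
  have h1 : ((occ.insert w v).items).map fval
      = ((PySem.Dict.mk (occ.items.map fval)).insert w ((v.length : Int))).items := by
    rw [insert_items_of_contains occ w v h,
        insert_items_of_contains _ w ((v.length : Int)) h']
    rw [List.map_map, List.map_map]
    apply List.map_congr_left
    intro p _
    by_cases hk : p.1 = w
    · simp [fval, hk]
    · simp [fval, hk]
  exact congrArg PySem.Dict.mk h1

-- main inner-loop invariant: one document, word by word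
theorem inner_inv (i : Int) :
    ∀ (doc : List String) (occ : PySem.Dict String (PySem.Set Int)) (lr : List String),
    (occ.items.map Prod.fst).Nodup →
    (∀ p ∈ occ.items, ∀ j ∈ p.2, j ≤ i) →
    (∀ w, w ∈ lr ↔ i ∈ occ.getD w PySem.Set.empty) →
    (doc.foldl aStep (PySem.Dict.mk (occ.items.map fval), lr)).1
        = PySem.Dict.mk ((doc.foldl (bAdd i) occ).items.map fval)
      ∧ ((doc.foldl (bAdd i) occ).items.map Prod.fst).Nodup
      ∧ (∀ p ∈ (doc.foldl (bAdd i) occ).items, ∀ j ∈ p.2, j ≤ i) := by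
  intro doc
  induction doc with
  | nil => intro occ lr h1 h2 _; exact ⟨rfl, h1, h2⟩
  | cons w t ih =>
    intro occ lr h1 h2 h3
    simp only [List.foldl_cons]
    by_cases hc : occ.contains w = true
    · obtain ⟨pr, hf, hk, hv⟩ := find?_of_contains_true occ w hc
      have hgd : occ.getD w PySem.Set.empty = pr.2 := by simp [PySem.Dict.getD, hv]
      have hmem : (w, pr.2) ∈ occ.items := get?_some_mem occ w pr.2 hv
      have hcd : (PySem.Dict.mk (occ.items.map fval)).contains w = true := by
        rw [contains_map_fval]; exact hc
      by_cases hw : w ∈ lr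
      · -- repeated word within the same document: both sides are unchanged
        have hi : i ∈ pr.2 := by rw [← hgd]; exact (h3 w).mp hw
        have hb : bAdd i occ w = occ := by
          unfold bAdd PySem.Dict.modify
          rw [hgd]
          beta_reduce
          rw [PySem.Set.add_of_mem hi, ← hgd]
          exact insert_getD_self occ w PySem.Set.empty h1 hc
        have ha : aStep (PySem.Dict.mk (occ.items.map fval), lr) w
            = (PySem.Dict.mk (occ.items.map fval), lr) := by
          unfold aStep
          simp [hcd, hw]
        rw [ha, hb]
        exact ih occ lr h1 h2 h3
      · -- first occurrence in this document of an already-known word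
        have hi : i ∉ pr.2 := by rw [← hgd]; exact fun hmm => hw ((h3 w).mpr hmm)
        have hb : bAdd i occ w = occ.insert w (pr.2 ++ [i]) := by
          unfold bAdd PySem.Dict.modify
          rw [hgd]
          beta_reduce
          rw [PySem.Set.add_of_not_mem hi]
        have hdg : (PySem.Dict.mk (occ.items.map fval)).getD w 0 = ((pr.2.length : Int)) := by
          simp [PySem.Dict.getD, get?_map_fval, hv]
        have ha : aStep (PySem.Dict.mk (occ.items.map fval), lr) w
            = ((PySem.Dict.mk (occ.items.map fval)).insert w ((pr.2.length : Int) + 1),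
               lr ++ [w]) := by
          unfold aStep PySem.Dict.modify
          simp [hcd, hw, hdg]
        have heq : PySem.Dict.mk (((occ.insert w (pr.2 ++ [i])).items).map fval)
            = (PySem.Dict.mk (occ.items.map fval)).insert w ((pr.2.length : Int) + 1) := by
          rw [insert_map_fval occ w (pr.2 ++ [i]) hc]
          congr 1
          push_cast [List.length_append, List.length_singleton]
          ring
        rw [ha, hb, ← heq]
        refine ih _ _ ?_ ?_ ?_
        · rw [keys_insert_of_contains occ w _ hc]; exact h1
        · intro p hp j hj
          rcases mem_insert_items occ w _ p hp with hcase | hcase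
          · rw [hcase] at hj
            rcases List.mem_append.mp hj with h' | h'
            · exact h2 _ hmem j h'
            · simp only [List.mem_singleton] at h'; omega
          · exact h2 p hcase j hj
        · intro w'
          by_cases hww : w' = w
          · subst hww
            simp [PySem.Dict.getD, PySem.Dict.get?_insert_self]
          · simp only [List.mem_append, List.mem_singleton]
            rw [PySem.Dict.getD_insert_of_ne _ _ _ hww]
            constructor
            · rintro (hcase | hcase)
              · exact (h3 w').mp hcase
              · exact absurd hcase hww
            · intro hcase; left; exact (h3 w').mpr hcase
    · -- a word never seen before, in any document
      have hc' : occ.contains w = false := by simpa using hc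
      have hcd : (PySem.Dict.mk (occ.items.map fval)).contains w = false := by
        rw [contains_map_fval]; exact hc'
      have hge : occ.getD w PySem.Set.empty = PySem.Set.empty := by
        simp [PySem.Dict.getD, get?_eq_none_of_contains_false occ w hc']
      have hb : bAdd i occ w = occ.insert w ([i] : PySem.Set Int) := by
        unfold bAdd PySem.Dict.modify
        rw [hge]
        beta_reduce
        rw [PySem.Set.add_of_not_mem (by simp [PySem.Set.empty])]
        rfl
      have ha : aStep (PySem.Dict.mk (occ.items.map fval), lr) w
          = ((PySem.Dict.mk (occ.items.map fval)).insert w 1, lr ++ [w]) := by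
        unfold aStep
        simp [hcd]
      have hins : (occ.insert w ([i] : PySem.Set Int)).items = occ.items ++ [(w, [i])] :=
        insert_items_of_not_contains occ w _ hc'
      have heq : (PySem.Dict.mk (occ.items.map fval)).insert w 1
          = PySem.Dict.mk (((occ.insert w ([i] : PySem.Set Int)).items).map fval) := by
        have e1 : ((PySem.Dict.mk (occ.items.map fval)).insert w 1).items
            = occ.items.map fval ++ [(w, (1 : Int))] :=
          insert_items_of_not_contains _ w 1 hcd
        have e2 : ((occ.insert w ([i] : PySem.Set Int)).items).map fval
            = occ.items.map fval ++ [(w, (1 : Int))] := by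
          rw [hins]; simp [fval]
        calc (PySem.Dict.mk (occ.items.map fval)).insert w 1
            = PySem.Dict.mk (((PySem.Dict.mk (occ.items.map fval)).insert w 1).items) := rfl
          _ = PySem.Dict.mk (((occ.insert w ([i] : PySem.Set Int)).items).map fval) := by
              rw [e1, e2]
      rw [ha, hb, heq]
      refine ih _ _ ?_ ?_ ?_
      · rw [hins]
        simp only [List.map_append, List.map_cons, List.map_nil]
        rw [List.nodup_append]
        refine ⟨h1, List.nodup_singleton w, ?_⟩
        intro a hka b hkb
        have hbw : b = w := by simpa using hkb
        intro he
        exact not_mem_keys_of_contains_false occ w hc' (hbw ▸ he ▸ hka)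
      · intro p hp j hj
        rw [hins] at hp
        rcases List.mem_append.mp hp with hcase | hcase
        · exact h2 p hcase j hj
        · simp only [List.mem_singleton] at hcase
          rw [hcase] at hj
          simp only [List.mem_singleton] at hj
          omega
      · intro w'
        by_cases hww : w' = w
        · subst hww
          simp [PySem.Dict.getD, PySem.Dict.get?_insert_self]
        · simp only [List.mem_append, List.mem_singleton]
          rw [PySem.Dict.getD_insert_of_ne _ _ _ hww]
          constructor
          · rintro (hcase | hcase)
            · exact (h3 w').mp hcase
            · exact absurd hcase hww
          · intro hcase; left; exact (h3 w').mpr hcase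

-- outer loop: document by document, in step with enumerate
theorem outer_inv :
    ∀ (docs : List (List String)) (i : Int) (occ : PySem.Dict String (PySem.Set Int)),
    (occ.items.map Prod.fst).Nodup →
    (∀ p ∈ occ.items, ∀ j ∈ p.2, j < i) →
    docs.foldl aDoc (PySem.Dict.mk (occ.items.map fval))
      = PySem.Dict.mk (((PySem.List.enumerate docs i).foldl bDoc occ).items.map fval) := by
  intro docs
  induction docs with
  | nil => intro i occ _ _; rw [PySem.List.enumerate_nil]; rfl
  | cons doc t ih =>
    intro i occ h1 h2
    rw [PySem.List.enumerate_cons]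
    simp only [List.foldl_cons]
    have h3 : ∀ w, w ∈ ([] : List String) ↔ i ∈ occ.getD w PySem.Set.empty := by
      intro w
      simp only [List.not_mem_nil, false_iff]
      intro hmm
      rcases hg : occ.get? w with _ | s
      · rw [PySem.Dict.getD, hg] at hmm
        simp [PySem.Set.empty] at hmm
      · rw [PySem.Dict.getD, hg] at hmm
        simp only [Option.getD_some] at hmm
        exact absurd (h2 _ (get?_some_mem occ w s hg) i hmm) (lt_irrefl i)
    obtain ⟨heq, hnd', hbd'⟩ :=
      inner_inv i doc occ [] h1 (fun p hp j hj => le_of_lt (h2 p hp j hj)) h3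
    have hstep : aDoc (PySem.Dict.mk (occ.items.map fval)) doc
        = PySem.Dict.mk (((bDoc occ (i, doc)).items).map fval) := heq
    rw [hstep]
    exact ih (i + 1) (bDoc occ (i, doc)) hnd'
      (fun p hp j hj => lt_of_le_of_lt (hbd' p hp j hj) (by omega))

-- ===== VERDICT (by name: the statement is the Claim_ definition above) =====
theorem count_doc_frequencies_spec : Claim_equal_count_doc_frequencies := by
  intro docs _
  unfold Spec_count_doc_frequencies count_doc_frequencies count_doc_frequencies_alt
  have h := outer_inv docs 0 PySem.Dict.empty (by simp [PySem.Dict.empty]) (by simp [PySem.Dict.empty])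
  have he : PySem.Dict.mk ((PySem.Dict.empty : PySem.Dict String (PySem.Set Int)).items.map fval)
      = (PySem.Dict.empty : PySem.Dict String Int) := by rfl
  rw [he] at h
  rw [h]
  simp [fval, PySem.Set.len]
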